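-- pv_equiv track=rewrite | github.com/access-kit/ak-rpi | ak_rpi/utils.py | select_ip_by_priority
-- ===== SOURCE A (Python) =====
-- def select_ip_by_priority(ip_addresses: dict[str, str]) -> str:
--     """Select the best ip address by priority.
--
--     Args:
--         ip_addresses (dict[str, str]): The ip addresses.
--
--     Returns:
--         ip_address (str): The best ip address.
--     """
--     keys_priority = ["ethernet", "eth0", "wi-fi", "wifi", "wlan0"]
--     best_match = next(iter(ip_addresses.values()), "127.0.0.1")
--     best_ix = len(keys_priority)
--     for key, val in ip_addresses.items():
--         if key.lower() in keys_priority: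
--             ix = keys_priority.index(key.lower())
--             if ix < best_ix:
--                 best_match = val
--                 best_ix = ix
--     return best_match
-- ===== SOURCE B (Python) =====
-- def select_ip_by_priority(ip_addresses: dict[str, str]) -> str:
--     """Select the best ip address by priority."""
--     lookup: dict[str, str] = {}
--     for key, val in ip_addresses.items():
--         low = key.lower()
--         if low not in lookup:
--             lookup[low] = val
--     for pk in ["ethernet", "eth0", "wi-fi", "wifi", "wlan0"]:
--         if pk in lookup:
--             return lookup[pk]
--     return next(iter(ip_addresses.values()), "127.0.0.1")
-- ===== Notes on version B (the rewrite author's own statement) =====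
-- stated objective: simpler
-- what changed: Instead of scanning the dict while tracking a running best index found via list.index, B builds a case-insensitive first-occurrence lookup once and then walks the fixed priority list, returning the value of the first priority key present.
import Mathlib
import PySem

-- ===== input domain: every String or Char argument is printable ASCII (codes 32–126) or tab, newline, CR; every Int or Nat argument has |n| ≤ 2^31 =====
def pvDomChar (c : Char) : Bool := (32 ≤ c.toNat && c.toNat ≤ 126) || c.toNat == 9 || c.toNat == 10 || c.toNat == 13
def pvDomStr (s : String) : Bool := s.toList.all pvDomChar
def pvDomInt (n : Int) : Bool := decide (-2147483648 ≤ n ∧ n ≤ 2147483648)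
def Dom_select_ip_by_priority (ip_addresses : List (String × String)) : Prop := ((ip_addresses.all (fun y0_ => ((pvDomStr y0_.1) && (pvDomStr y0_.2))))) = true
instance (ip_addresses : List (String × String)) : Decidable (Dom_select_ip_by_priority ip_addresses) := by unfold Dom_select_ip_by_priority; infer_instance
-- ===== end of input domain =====

-- B replaces A's running-best scan (list.index inside the loop) by a one-pass
-- case-insensitive first-occurrence lookup followed by a walk of the priority list: simpler.

-- ===== PORT A =====
def select_ip_by_priority (ip_addresses : List (String × String)) : String :=
  let keys_priority : List String := ["ethernet", "eth0", "wi-fi", "wifi", "wlan0"]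
  let best_match : String := match ip_addresses with
    | [] => "127.0.0.1"
    | (_, v) :: _ => v
  let st := ip_addresses.foldl (fun (st : String × Int) kv =>
    match PySem.List.index? keys_priority (PySem.Str.lower kv.1) with
    | some ix => if (ix : Int) < st.2 then (kv.2, (ix : Int)) else st
    | none => st) (best_match, (5 : Int))
  st.1

-- ===== PORT B =====
def select_ip_by_priority_alt (ip_addresses : List (String × String)) : String :=
  let lookup := ip_addresses.foldl (fun (d : PySem.Dict String String) kv =>
      if d.contains (PySem.Str.lower kv.1) then d else d.insert (PySem.Str.lower kv.1) kv.2)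
    PySem.Dict.empty
  match ["ethernet", "eth0", "wi-fi", "wifi", "wlan0"].find? (fun pk => lookup.contains pk) with
  | some pk => lookup.getD pk ""
  | none => match ip_addresses with
    | [] => "127.0.0.1"
    | (_, v) :: _ => v

-- ===== PRECONDITION & SPEC =====
def Spec_select_ip_by_priority (ip_addresses : List (String × String)) (out : String) : Prop := out = select_ip_by_priority_alt ip_addresses
instance (ip_addresses : List (String × String)) (out : String) : Decidable (Spec_select_ip_by_priority ip_addresses out) := by unfold Spec_select_ip_by_priority; infer_instance

-- ===== CLAIM (what is proved, stated in full; the proofs are below) =====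
def Claim_equal_select_ip_by_priority : Prop := ∀ (ip_addresses : List (String × String)), Dom_select_ip_by_priority ip_addresses → Spec_select_ip_by_priority ip_addresses (select_ip_by_priority ip_addresses)

-- ===== LEMMAS AND PROOFS =====

-- the fixed priority list
def pvP : List String := ["ethernet", "eth0", "wi-fi", "wifi", "wlan0"]

def pvKey (kv : String × String) : String := PySem.Str.lower kv.1

-- first pair of l whose lowercased key is pk
def pvFind (l : List (String × String)) (pk : String) : Option (String × String) :=
  l.find? (fun kv => pvKey kv == pk)

-- common characterisation of both programs: the value of the first priority key
-- (among ps) present (case-insensitively, first occurrence) in l, else the default b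
def pvSel (l : List (String × String)) (ps : List String) (b : String) : String :=
  ((ps.find? (fun pk => (pvFind l pk).isSome)).bind
    (fun pk => (pvFind l pk).map (·.2))).getD b

def pvDefault (l : List (String × String)) : String :=
  match l with
  | [] => "127.0.0.1"
  | (_, v) :: _ => v

-- A's loop body, with the running best index tracked as a Nat
def pvStepA (st : String × Nat) (kv : String × String) : String × Nat :=
  match PySem.List.index? pvP (pvKey kv) with
  | some j => if j < st.2 then (kv.2, j) else st
  | none => st

-- B's loop body
def pvStepB (d : PySem.Dict String String) (kv : String × String) : PySem.Dict String String :=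
  if d.contains (pvKey kv) then d else d.insert (pvKey kv) kv.2

theorem pvFind_cons_ne {kv : String × String} {pk : String} (h : pvKey kv ≠ pk)
    (l : List (String × String)) : pvFind (kv :: l) pk = pvFind l pk := by
  have hb : (pvKey kv == pk) = false := beq_eq_false_iff_ne.mpr h
  simp [pvFind, List.find?, hb]

theorem pv_find?_congr {α : Type} {p q : α → Bool} :
    ∀ (l : List α), (∀ a ∈ l, p a = q a) → l.find? p = l.find? q := by
  intro l
  induction l with
  | nil => intro _; rfl
  | cons x xs ih =>
    intro h
    simp only [List.find?]
    rw [h x (by simp)]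
    cases q x with
    | true => rfl
    | false => exact ih (fun a ha => h a (by simp [ha]))

theorem pv_find_isSome {l : List (String × String)} {ps : List String} {pk : String}
    (hf : ps.find? (fun pk => (pvFind l pk).isSome) = some pk) :
    ∃ kv, pvFind l pk = some kv := by
  have hs := List.find?_some hf
  cases hv : pvFind l pk with
  | none => rw [hv] at hs; simp at hs
  | some kv => exact ⟨kv, rfl⟩

theorem pvStepA_none {kv : String × String} (st : String × Nat)
    (hix : PySem.List.index? pvP (pvKey kv) = none) : pvStepA st kv = st := by
  unfold pvStepA; rw [hix]

theorem pvStepA_lt {kv : String × String} {j : Nat} (st : String × Nat)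
    (hix : PySem.List.index? pvP (pvKey kv) = some j) (hj : j < st.2) :
    pvStepA st kv = (kv.2, j) := by
  unfold pvStepA; rw [hix]; simp [hj]

theorem pvStepA_ge {kv : String × String} {j : Nat} (st : String × Nat)
    (hix : PySem.List.index? pvP (pvKey kv) = some j) (hj : ¬ j < st.2) :
    pvStepA st kv = st := by
  unfold pvStepA; rw [hix]; simp [hj]

theorem pvSel_cons_not_mem {kv : String × String} {ps : List String}
    (h : ∀ pk ∈ ps, pk ≠ pvKey kv) (l : List (String × String)) (b : String) :
    pvSel (kv :: l) ps b = pvSel l ps b := by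
  unfold pvSel
  have hc : ps.find? (fun pk => (pvFind (kv :: l) pk).isSome)
      = ps.find? (fun pk => (pvFind l pk).isSome) := by
    apply pv_find?_congr
    intro pk hpk
    rw [pvFind_cons_ne (fun he => h pk hpk he.symm)]
  rw [hc]
  cases hf : ps.find? (fun pk => (pvFind l pk).isSome) with
  | none => rfl
  | some pk =>
    have hpk : pk ∈ ps := List.mem_of_find?_eq_some hf
    simp only [Option.bind]
    rw [pvFind_cons_ne (fun he => h pk hpk he.symm)]

-- invariant of A's loop
theorem pv_foldA_inv :
    ∀ (l : List (String × String)) (b : String) (n : Nat), n ≤ 5 →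
      (l.foldl pvStepA (b, n)).1 = pvSel l (pvP.take n) b := by
  intro l
  induction l with
  | nil =>
    intro b n _
    have hnone : (pvP.take n).find?
        (fun pk => (pvFind ([] : List (String × String)) pk).isSome) = none :=
      List.find?_eq_none.mpr (fun pk _ => by simp [pvFind])
    simp [pvSel, hnone]
  | cons kv l ih =>
    intro b n hn
    simp only [List.foldl_cons]
    cases hix : PySem.List.index? pvP (pvKey kv) with
    | none =>
      have hnotin : pvKey kv ∉ pvP := (PySem.List.index?_eq_none_iff _ _).mp hix
      rw [pvStepA_none _ hix, ih b n hn,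
        pvSel_cons_not_mem (fun pk hpk he => hnotin (he ▸ List.mem_of_mem_take hpk)) l b]
    | some j =>
      obtain ⟨pre, suf, hP, hlen, hnpre⟩ := (PySem.List.index?_eq_some_iff _ _ _).mp hix
      by_cases hj : j < n
      · rw [pvStepA_lt _ hix hj, ih kv.2 j (Nat.le_of_lt (Nat.lt_of_lt_of_le hj hn))]
        have htj : pvP.take j = pre := by
          rw [hP, List.take_append, ← hlen, List.take_length]
          simp
        have htn : pvP.take n = pre ++ pvKey kv :: suf.take (n - j - 1) := by
          have h2 : List.take (n - pre.length) (pvKey kv :: suf)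
              = pvKey kv :: List.take (n - j - 1) suf := by
            rw [show n - pre.length = (n - j - 1) + 1 by omega, List.take_succ_cons]
          rw [hP, List.take_append, List.take_of_length_le (by omega : pre.length ≤ n), h2]
        rw [htj, htn]
        unfold pvSel
        rw [List.find?_append]
        have hpre_eq : pre.find? (fun pk => (pvFind (kv :: l) pk).isSome)
            = pre.find? (fun pk => (pvFind l pk).isSome) := by
          apply pv_find?_congr
          intro pk hpk
          rw [pvFind_cons_ne (fun he => hnpre (he ▸ hpk))]
        rw [hpre_eq]
        cases hf : pre.find? (fun pk => (pvFind l pk).isSome) with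
        | some pk =>
          simp only [Option.some_or, Option.bind]
          have hpk : pk ∈ pre := List.mem_of_find?_eq_some hf
          rw [pvFind_cons_ne (fun he => hnpre (he ▸ hpk))]
          obtain ⟨kv', hv'⟩ := pv_find_isSome hf
          rw [hv']
          rfl
        | none =>
          simp only [Option.none_or]
          have hhead : pvFind (kv :: l) (pvKey kv) = some kv := by
            simp [pvFind, List.find?]
          have hp : ((pvFind (kv :: l) (pvKey kv)).isSome) = true := by rw [hhead]; rfl
          have hfc : List.find? (fun pk => (pvFind (kv :: l) pk).isSome)
              (pvKey kv :: List.take (n - j - 1) suf) = some (pvKey kv) :=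
            List.find?_cons_of_pos hp
          rw [hfc]
          simp only [Option.bind]
          rw [hhead]
          simp
      · rw [pvStepA_ge _ hix hj, ih b n hn]
        have htn : pvP.take n = pre.take n := by
          rw [hP, List.take_append, show n - pre.length = 0 by omega]
          simp
        rw [pvSel_cons_not_mem (fun pk hpk he => by
          rw [htn] at hpk
          exact hnpre (he ▸ List.mem_of_mem_take hpk)) l b]

-- B's lookup characterised: first occurrence of each lowercased key wins
theorem pv_foldB_get? :
    ∀ (l : List (String × String)) (d : PySem.Dict String String) (x : String),
      (l.foldl pvStepB d).get? x = (d.get? x).or ((pvFind l x).map (·.2)) := by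
  intro l
  induction l with
  | nil => intro d x; cases hd : d.get? x <;> simp [pvFind, hd]
  | cons kv l ih =>
    intro d x
    simp only [List.foldl_cons]
    by_cases hk : pvKey kv = x
    · subst hk
      by_cases hc : d.contains (pvKey kv)
      · rw [show pvStepB d kv = d by simp [pvStepB, hc], ih]
        have hs : (d.get? (pvKey kv)).isSome := by
          rw [← PySem.Dict.contains_eq_isSome_get?]; exact hc
        cases hv : d.get? (pvKey kv) with
        | none => rw [hv] at hs; simp at hs
        | some v => simp
      · rw [show pvStepB d kv = d.insert (pvKey kv) kv.2 by simp [pvStepB, hc], ih]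
        have hnone : d.get? (pvKey kv) = none := by
          cases hv : d.get? (pvKey kv) with
          | none => rfl
          | some v =>
            exfalso; apply hc
            rw [PySem.Dict.contains_eq_isSome_get?, hv]; rfl
        rw [PySem.Dict.get?_insert_self, hnone]
        have hhead : pvFind (kv :: l) (pvKey kv) = some kv := by
          simp [pvFind, List.find?]
        rw [hhead]
        simp
    · have hstep : (pvStepB d kv).get? x = d.get? x := by
        unfold pvStepB
        split
        · rfl
        · exact PySem.Dict.get?_insert_of_ne _ _ (fun he => hk he.symm)
      rw [ih, hstep, pvFind_cons_ne hk]

theorem pv_altB (l : List (String × String)) :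
    select_ip_by_priority_alt l = pvSel l pvP (pvDefault l) := by
  rw [show select_ip_by_priority_alt l =
      (match pvP.find? (fun pk => (l.foldl pvStepB PySem.Dict.empty).contains pk) with
        | some pk => (l.foldl pvStepB PySem.Dict.empty).getD pk ""
        | none => pvDefault l) from rfl]
  have hget : ∀ x, (l.foldl pvStepB PySem.Dict.empty).get? x = (pvFind l x).map (·.2) := by
    intro x
    rw [pv_foldB_get? l PySem.Dict.empty x, PySem.Dict.get?_empty]
    rfl
  have hcont : (fun pk => (l.foldl pvStepB PySem.Dict.empty).contains pk)
      = (fun pk => (pvFind l pk).isSome) := by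
    funext x
    rw [PySem.Dict.contains_eq_isSome_get?, hget]
    cases pvFind l x <;> rfl
  rw [hcont]
  cases hf : pvP.find? (fun pk => (pvFind l pk).isSome) with
  | none => simp [pvSel, hf]
  | some pk =>
    obtain ⟨kv, hv⟩ := pv_find_isSome hf
    simp only [pvSel, hf, Option.bind]
    rw [PySem.Dict.getD_eq_get?_getD, hget pk, hv]
    simp

-- bridge: A's Int-indexed fold computes the Nat-indexed fold
theorem pv_fold_int_nat :
    ∀ (l : List (String × String)) (b : String) (n : Nat),
      (l.foldl (fun (st : String × Int) kv =>
        match PySem.List.index? pvP (PySem.Str.lower kv.1) with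
        | some ix => if (ix : Int) < st.2 then (kv.2, (ix : Int)) else st
        | none => st) (b, (n : Int))).1 = (l.foldl pvStepA (b, n)).1 := by
  intro l
  induction l with
  | nil => intro b n; rfl
  | cons kv l ih =>
    intro b n
    simp only [List.foldl_cons]
    cases hix : PySem.List.index? pvP (PySem.Str.lower kv.1) with
    | none =>
      rw [pvStepA_none _ hix]
      exact ih b n
    | some j =>
      by_cases hj : j < n
      · rw [show (match some j with
            | some ix => if (ix : Int) < (n : Int) then (kv.2, (ix : Int)) else (b, (n : Int))
            | none => (b, (n : Int))) = (kv.2, (j : Int)) by simp [hj]]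
        rw [pvStepA_lt _ hix hj]
        exact ih kv.2 j
      · rw [show (match some j with
            | some ix => if (ix : Int) < (n : Int) then (kv.2, (ix : Int)) else (b, (n : Int))
            | none => (b, (n : Int))) = (b, (n : Int)) by simp [hj]]
        rw [pvStepA_ge _ hix hj]
        exact ih b n

theorem pv_A (l : List (String × String)) :
    select_ip_by_priority l = pvSel l pvP (pvDefault l) := by
  rw [show select_ip_by_priority l =
      (l.foldl (fun (st : String × Int) kv =>
        match PySem.List.index? pvP (PySem.Str.lower kv.1) with
        | some ix => if (ix : Int) < st.2 then (kv.2, (ix : Int)) else st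
        | none => st) (pvDefault l, ((5 : Nat) : Int))).1 from rfl]
  rw [pv_fold_int_nat l (pvDefault l) 5, pv_foldA_inv l (pvDefault l) 5 (Nat.le_refl 5)]
  rfl

-- ===== VERDICT (by name: the statement is the Claim_ definition above) =====
theorem select_ip_by_priority_spec : Claim_equal_select_ip_by_priority := by
  intro l _
  unfold Spec_select_ip_by_priority
  rw [pv_A l, pv_altB l]
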